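-- pv_equiv track=rewrite | github.com/jcrozum/pystablemotifs | StableMotifs/Format.py | statelist2dict
-- ===== SOURCE A (Python) =====
-- def statelist2dict(names,statestrings):
--     """Converts a collection of statestrings to a dictionary.
--
--     Parameters
--     ----------
--     names : list of str
--         An ordered list of variable names; (alphabetical order is PyBoolNet's
--         default, e.g. sorted(primes)).
--     c : iterable of str
--         Each element should be a binary string, with each position corresponding
--         to the variable name at the same position in names.
--
--     Returns
--     -------
--     dictionary
--         Dictionary summarizing c. If a node takes the same value in every state,
--         the corresponding dictionary value matches its fixed value; otherwise,
--         the dictionary value is 'X'.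
--
--     """
--     d = {}
--     for i,n in enumerate(names):
--         for cs in statestrings:
--             if n not in d:
--                 d[n] = cs[i]
--                 continue
--             if cs[i] != d[n]:
--                 d[n] = 'X'
--                 break
--     return d
-- ===== SOURCE B (Python) =====
-- def statelist2dict(names, statestrings):
--     """Transpose-then-reduce: build per-position character columns in one pass
--     over the statestrings, then map each name's column set to its lone value
--     (or 'X' when the column is not uniform)."""
--     if not statestrings:
--         return {}
--     cols = [set() for _ in names]
--     for cs in statestrings:
--         cols = [col | {cs[i]} for i, col in enumerate(cols)]
--     return {n: col.pop() if len(col) == 1 else 'X'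
--             for n, col in zip(names, cols)}
-- ===== Notes on version B (the rewrite author's own statement) =====
-- stated objective: alternative
-- what changed: Replaces A's per-name early-break scan with stateful dict mutation by a transpose-then-reduce: one pass over the statestrings accumulates per-position character sets, then each name maps to its column's lone value or 'X'.
-- outside the precondition, e.g. on statelist2dict(['a', 'a'], ['01']): A returns {'a': 'X'}, B returns {'a': '1'}; on statelist2dict(['a'], ['0', '1', '']): A returns {'a': 'X'}, B raises IndexError
import Mathlib
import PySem

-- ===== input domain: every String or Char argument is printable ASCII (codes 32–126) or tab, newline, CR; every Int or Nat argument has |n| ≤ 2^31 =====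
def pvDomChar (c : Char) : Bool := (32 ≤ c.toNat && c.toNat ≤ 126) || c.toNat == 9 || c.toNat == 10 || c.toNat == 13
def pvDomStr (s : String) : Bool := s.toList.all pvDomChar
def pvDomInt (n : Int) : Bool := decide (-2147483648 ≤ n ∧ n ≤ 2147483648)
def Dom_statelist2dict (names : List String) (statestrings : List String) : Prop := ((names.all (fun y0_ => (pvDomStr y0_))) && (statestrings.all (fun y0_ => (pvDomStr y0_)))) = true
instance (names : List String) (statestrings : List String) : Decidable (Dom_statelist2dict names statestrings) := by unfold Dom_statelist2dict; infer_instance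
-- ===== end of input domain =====

-- B restructures A as a transpose-then-reduce (one pass building per-position column sets,
-- then a per-name reduction); objective: alternative decomposition, same cost.

-- shared primitive: the characters of Python's cs[i] ([] exactly where Python raises IndexError)
def charListAt (cs : String) (i : Int) : List Char :=
  match PySem.Str.pyGet? cs i with
  | some c => [c]
  | none => []

-- Python's cs[i] as the 1-character string (out of range excluded by Pre_)
def pyCharAt (cs : String) (i : Int) : String := String.ofList (charListAt cs i)

-- ===== PORT A =====
-- body of A's inner loop over the statestrings at column i, key n; the Bool is the 'break' flag
def stepA (i : Int) (n : String) (st : PySem.Dict String String × Bool) (cs : String) :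
    PySem.Dict String String × Bool :=
  if st.2 then st
  else if st.1.contains n = false then (st.1.insert n (pyCharAt cs i), false)
  else if pyCharAt cs i ≠ st.1.getD n "" then (st.1.insert n "X", true)
  else st

def statelist2dict (names : List String) (statestrings : List String) : List (String × String) :=
  ((PySem.List.enumerate names).foldl
    (fun d p => (statestrings.foldl (stepA p.1 p.2) (d, false)).1)
    PySem.Dict.empty).items

-- ===== PORT B =====
-- body of B's loop over the statestrings: cols = [col | {cs[i]} for i, col in enumerate(cols)]
def colsStepB (cols : List (PySem.Set Char)) (cs : String) : List (PySem.Set Char) :=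
  (PySem.List.enumerate cols).map
    (fun q => PySem.Set.union q.2 (PySem.Set.ofList (charListAt cs q.1)))

-- col.pop() if len(col) == 1 else 'X'
def colValB (col : PySem.Set Char) : String :=
  if col.length = 1 then String.ofList col else "X"

def statelist2dict_alt (names : List String) (statestrings : List String) : List (String × String) :=
  if statestrings = [] then []
  else
    let cols := statestrings.foldl colsStepB (names.map (fun _ => (PySem.Set.empty : PySem.Set Char)))
    ((names.zip cols).foldl
      (fun (d : PySem.Dict String String) q => d.insert q.1 (colValB q.2))
      PySem.Dict.empty).items

-- ===== PRECONDITION & SPEC =====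
-- Pre_ excludes (a) duplicate names, on which A's value is an artefact of reusing one dict key
-- across several columns, and (b) statestring lists containing a string shorter than names, on
-- which A usually raises IndexError and returns only by accident of the early break.
def Pre_statelist2dict (names : List String) (statestrings : List String) : Prop :=
  names.Nodup ∧ (statestrings = [] ∨ ∀ cs ∈ statestrings, names.length ≤ cs.toList.length)
instance (names : List String) (statestrings : List String) : Decidable (Pre_statelist2dict names statestrings) := by unfold Pre_statelist2dict; infer_instance

def pvWitness_statelist2dict : List String × List String := (["a", "b"], ["01", "01", "11"])

def Spec_statelist2dict (names : List String) (statestrings : List String) (out : List (String × String)) : Prop := out = statelist2dict_alt names statestrings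
instance (names : List String) (statestrings : List String) (out : List (String × String)) : Decidable (Spec_statelist2dict names statestrings out) := by unfold Spec_statelist2dict; infer_instance

-- ===== CLAIM (what is proved, stated in full; the proofs are below) =====
def Claim_equal_statelist2dict : Prop := ∀ (names : List String) (statestrings : List String), Dom_statelist2dict names statestrings → Pre_statelist2dict names statestrings → Spec_statelist2dict names statestrings (statelist2dict names statestrings)

-- ===== LEMMAS AND PROOFS =====

lemma foldl_stepA_broken (l : List String) (i : Int) (n : String) (d : PySem.Dict String String) :
    l.foldl (stepA i n) (d, true) = (d, true) := by
  induction l with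
  | nil => rfl
  | cons cs l ih => simpa [stepA] using ih

lemma foldl_stepA_present (l : List String) (i : Int) (n : String) (d : PySem.Dict String String)
    (s0 : String) (h : d.get? n = some s0) :
    l.foldl (stepA i n) (d, false) =
      if l.all (fun cs => pyCharAt cs i == s0) then (d, false) else (d.insert n "X", true) := by
  induction l with
  | nil => simp
  | cons cs l ih =>
    have hc : d.contains n = true := by
      rw [PySem.Dict.contains_eq_isSome_get?, h]; rfl
    have hg : d.getD n "" = s0 := PySem.Dict.getD_of_get?_eq_some d "" h
    by_cases he : pyCharAt cs i = s0
    · simp only [List.foldl_cons, stepA, hc, hg]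
      simp [he, ih]
    · simp only [List.foldl_cons, stepA, hc, hg]
      simp [he, foldl_stepA_broken]

def colValA (c0 : String) (rest : List String) (i : Int) : String :=
  if rest.all (fun cs => pyCharAt cs i == pyCharAt c0 i) then pyCharAt c0 i else "X"

lemma foldl_stepA_column (c0 : String) (rest : List String) (i : Int) (n : String)
    (d : PySem.Dict String String) (h : d.contains n = false) :
    ((c0 :: rest).foldl (stepA i n) (d, false)).1 = d.insert n (colValA c0 rest i) := by
  have h1 : (c0 :: rest).foldl (stepA i n) (d, false)
      = rest.foldl (stepA i n) (d.insert n (pyCharAt c0 i), false) := by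
    simp [stepA, h]
  rw [h1, foldl_stepA_present rest i n _ _ (PySem.Dict.get?_insert_self d n (pyCharAt c0 i)), colValA]
  split_ifs with hall
  · rfl
  · simp [PySem.Dict.insert_insert_self]

lemma foldl_outer_A (c0 : String) (rest : List String) (L : List String) (s : Int)
    (d : PySem.Dict String String) (hnd : L.Nodup) (hfresh : ∀ n ∈ L, d.contains n = false) :
    ((PySem.List.enumerate L s).foldl
        (fun d p => (((c0 :: rest)).foldl (stepA p.1 p.2) (d, false)).1) d).items
      = d.items ++ (PySem.List.enumerate L s).map (fun p => (p.2, colValA c0 rest p.1)) := by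
  induction L generalizing s d with
  | nil => simp [PySem.List.enumerate_nil]
  | cons h0 t ih =>
    rw [PySem.List.enumerate_cons]
    have hfr : d.contains h0 = false := hfresh h0 (by simp)
    have hstep : ((c0 :: rest).foldl (stepA s h0) (d, false)).1
        = d.insert h0 (colValA c0 rest s) := foldl_stepA_column c0 rest s h0 d hfr
    rw [List.foldl_cons, hstep, ih (s+1) _ hnd.of_cons ?_]
    · rw [PySem.Dict.items_insert_of_not_contains _ _ hfr]
      simp [List.map_cons]
    · intro n hn
      have hne : n ≠ h0 := by
        rintro rfl; exact (List.nodup_cons.mp hnd).1 hn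
      rw [PySem.Dict.contains_insert]
      simp [hne, hfresh n (by simp [hn])]

lemma length_colsStepB (cols : List (PySem.Set Char)) (cs : String) :
    (colsStepB cols cs).length = cols.length := by
  simp [colsStepB, PySem.List.length_enumerate]

lemma length_foldl_colsStepB (ss : List String) (cols : List (PySem.Set Char)) :
    (ss.foldl colsStepB cols).length = cols.length := by
  induction ss generalizing cols with
  | nil => rfl
  | cons cs ss ih => rw [List.foldl_cons, ih, length_colsStepB]

lemma ofList_charListAt (cs : String) (i : Int) :
    PySem.Set.ofList (charListAt cs i) = charListAt cs i := by
  unfold charListAt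
  cases PySem.Str.pyGet? cs i <;> rfl

lemma getD_colsStepB (cols : List (PySem.Set Char)) (cs : String) (k : Nat)
    (h : k < cols.length) :
    (colsStepB cols cs).getD k [] = PySem.Set.update (cols.getD k []) (charListAt cs (k : Int)) := by
  unfold colsStepB
  rw [List.getD_eq_getElem _ _ (by simp [PySem.List.length_enumerate, h]),
      List.getD_eq_getElem _ _ h]
  rw [List.getElem_map, PySem.List.getElem_enumerate]
  rw [ofList_charListAt]
  simp [PySem.Set.union]

lemma getD_foldl_colsStepB (ss : List String) (cols : List (PySem.Set Char)) (k : Nat)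
    (h : k < cols.length) :
    (ss.foldl colsStepB cols).getD k []
      = PySem.Set.update (cols.getD k []) (ss.flatMap (fun cs => charListAt cs (k : Int))) := by
  induction ss generalizing cols with
  | nil => simp [PySem.Set.update_nil]
  | cons cs ss ih =>
    rw [List.foldl_cons]
    rw [ih (colsStepB cols cs) (by rw [length_colsStepB]; exact h)]
    rw [getD_colsStepB cols cs k h]
    rw [List.flatMap_cons, PySem.Set.update_append]

lemma charListAt_of_lt (cs : String) (k : Nat) (h : k < cs.toList.length) :
    charListAt cs (k : Int) = [cs.toList.getD k ' '] := by
  unfold charListAt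
  simp [List.getElem?_eq_getElem h]

lemma strSingleton_eq_iff (c a : Char) : (String.ofList [c] == String.ofList [a]) = (c == a) := by
  by_cases h : c = a
  · simp [h]
  · have : ¬ String.ofList [c] = String.ofList [a] := by
      intro he; exact h (by simpa using congrArg String.toList he)
    simp [h, this]

lemma pyCharAt_eq_iff (cs c0 : String) (k : Nat) (h1 : k < cs.toList.length)
    (h2 : k < c0.toList.length) :
    (pyCharAt cs (k : Int) == pyCharAt c0 (k : Int)) = (cs.toList.getD k ' ' == c0.toList.getD k ' ') := by
  unfold pyCharAt
  rw [charListAt_of_lt cs k h1, charListAt_of_lt c0 k h2, strSingleton_eq_iff]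

lemma discard_eq_nil_iff (a : Char) (l : List Char) :
    PySem.Set.discard (PySem.Set.ofList l) a = [] ↔ ∀ x ∈ l, x = a := by
  rw [List.eq_nil_iff_forall_not_mem]
  constructor
  · intro h x hx
    by_contra hne
    exact h x ((PySem.Set.mem_discard _ _ _).mpr ⟨(PySem.Set.mem_ofList _ _).mpr hx, hne⟩)
  · intro hall x hx
    rw [PySem.Set.mem_discard, PySem.Set.mem_ofList] at hx
    exact hx.2 (hall x hx.1)

lemma singleton_ofList_len (a : Char) (l : List Char) :
    (PySem.Set.ofList (a :: l)).length = 1 ↔ ∀ x ∈ l, x = a := by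
  rw [PySem.Set.ofList_cons, List.length_cons, ← discard_eq_nil_iff a l,
      ← List.length_eq_zero_iff]
  omega

lemma flatMap_charListAt (l : List String) (k : Nat) (h : ∀ cs ∈ l, k < cs.toList.length) :
    l.flatMap (fun cs => charListAt cs (k : Int)) = l.map (fun cs => cs.toList.getD k ' ') := by
  induction l with
  | nil => rfl
  | cons cs l ih =>
    rw [List.flatMap_cons, charListAt_of_lt cs k (h cs (by simp)), List.map_cons,
        ih (fun c hc => h c (by simp [hc]))]
    rfl

lemma colVal_agree (c0 : String) (rest : List String) (k : Nat)
    (hc0 : k < c0.toList.length) (hrest : ∀ cs ∈ rest, k < cs.toList.length) :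
    colValA c0 rest (k : Int)
      = colValB (PySem.Set.ofList ((c0 :: rest).flatMap (fun cs => charListAt cs (k : Int)))) := by
  rw [flatMap_charListAt (c0 :: rest) k (by intro cs hcs; rcases List.mem_cons.mp hcs with rfl | h; exact hc0; exact hrest cs h)]
  rw [List.map_cons]
  unfold colValA colValB
  have hcond : (rest.all (fun cs => pyCharAt cs (k : Int) == pyCharAt c0 (k : Int)) = true)
      ↔ ∀ x ∈ rest.map (fun cs => cs.toList.getD k ' '), x = c0.toList.getD k ' ' := by
    rw [List.all_eq_true]
    constructor
    · intro hall x hx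
      obtain ⟨cs, hcs, rfl⟩ := List.mem_map.mp hx
      have := hall cs hcs
      rwa [pyCharAt_eq_iff cs c0 k (hrest cs hcs) hc0, beq_iff_eq] at this
    · intro hall cs hcs
      rw [pyCharAt_eq_iff cs c0 k (hrest cs hcs) hc0, beq_iff_eq]
      exact hall _ (List.mem_map.mpr ⟨cs, hcs, rfl⟩)
  by_cases hall : rest.all (fun cs => pyCharAt cs (k : Int) == pyCharAt c0 (k : Int)) = true
  · have h1 : (PySem.Set.ofList (c0.toList.getD k ' ' :: rest.map (fun cs => cs.toList.getD k ' '))).length = 1 :=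
      (singleton_ofList_len _ _).mpr (hcond.mp hall)
    rw [if_pos hall, if_pos h1]
    have h2 : PySem.Set.discard (PySem.Set.ofList (rest.map (fun cs => cs.toList.getD k ' '))) (c0.toList.getD k ' ') = [] :=
      (discard_eq_nil_iff _ _).mpr (hcond.mp hall)
    rw [PySem.Set.ofList_cons, h2]
    unfold pyCharAt
    rw [charListAt_of_lt c0 k hc0]
  · have h1 : ¬ (PySem.Set.ofList (c0.toList.getD k ' ' :: rest.map (fun cs => cs.toList.getD k ' '))).length = 1 := by
      rw [singleton_ofList_len]
      exact fun hc => hall (hcond.mpr hc)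
    rw [if_neg hall, if_neg h1]

theorem statelist2dict_eq_alt (names statestrings : List String) (hnd : names.Nodup)
    (hlen : statestrings = [] ∨ ∀ cs ∈ statestrings, names.length ≤ cs.toList.length) :
    statelist2dict names statestrings = statelist2dict_alt names statestrings := by
  cases statestrings with
  | nil =>
    unfold statelist2dict statelist2dict_alt
    rw [if_pos rfl]
    have hfix : ((PySem.List.enumerate names 0).foldl
        (fun d p => ((([] : List String)).foldl (stepA p.1 p.2) (d, false)).1) PySem.Dict.empty)
        = PySem.Dict.empty := List.foldl_fixed _
    rw [hfix]
    rfl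
  | cons c0 rest =>
    have hlen' : ∀ cs ∈ c0 :: rest, names.length ≤ cs.toList.length := by
      rcases hlen with h | h
      · exact absurd h (by simp)
      · exact h
    unfold statelist2dict statelist2dict_alt
    rw [if_neg (by simp)]
    rw [foldl_outer_A c0 rest names 0 PySem.Dict.empty hnd
      (fun n _ => PySem.Dict.contains_empty n),
      show (PySem.Dict.empty : PySem.Dict String String).items = [] from rfl,
      List.nil_append]
    show _ = ((names.zip ((c0 :: rest).foldl colsStepB (names.map (fun _ => (PySem.Set.empty : PySem.Set Char))))).foldl
      (fun (d : PySem.Dict String String) q => d.insert q.1 (colValB q.2)) PySem.Dict.empty).items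
    set cols := (c0 :: rest).foldl colsStepB (names.map (fun _ => (PySem.Set.empty : PySem.Set Char))) with hcols
    have hclen : cols.length = names.length := by
      rw [hcols, length_foldl_colsStepB, List.length_map]
    have hBitems : ((names.zip cols).foldl
        (fun (d : PySem.Dict String String) q => d.insert q.1 (colValB q.2))
        PySem.Dict.empty).items = (names.zip cols).map (fun q => (q.1, colValB q.2)) := by
      have hnod : ((names.zip cols).map (fun q : String × PySem.Set Char => q.1)).Nodup := by
        have : (names.zip cols).map (fun q : String × PySem.Set Char => q.1) = names := by
          rw [show (fun q : String × PySem.Set Char => q.1) = Prod.fst from rfl, List.map_fst_zip]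
          omega
        rw [this]; exact hnd
      rw [PySem.Dict.items_foldl_insert_fresh (names.zip cols) (fun q => q.1)
        (fun q => colValB q.2) PySem.Dict.empty (fun a _ => PySem.Dict.contains_empty a.1) hnod]
      rfl
    rw [hBitems]
    apply List.ext_getElem
    · simp [PySem.List.length_enumerate, hclen]
    · intro k hk1 hk2
      have hkn : k < names.length := by
        simpa [PySem.List.length_enumerate] using hk1
      have hck : k < cols.length := by omega
      rw [List.getElem_map, List.getElem_map, PySem.List.getElem_enumerate, List.getElem_zip]
      have hcolk : cols[k] = PySem.Set.ofList ((c0 :: rest).flatMap (fun cs => charListAt cs (k : Int))) := by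
        rw [← List.getD_eq_getElem cols [] hck, hcols,
          getD_foldl_colsStepB (c0 :: rest) _ k (by simpa using hkn)]
        have hinit : (names.map (fun _ => (PySem.Set.empty : PySem.Set Char))).getD k [] = [] := by
          rw [List.getD_eq_getElem _ _ (by simpa using hkn), List.getElem_map]
          rfl
        rw [hinit, PySem.Set.update_nil_left]
      rw [hcolk, Prod.mk.injEq]
      refine ⟨by simp, ?_⟩
      rw [show (0 : Int) + (k : Int) = (k : Int) by omega]
      exact colVal_agree c0 rest k
        (lt_of_lt_of_le hkn (hlen' c0 (by simp)))
        (fun cs hcs => lt_of_lt_of_le hkn (hlen' cs (by simp [hcs])))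

-- ===== VERDICT (by name: the statement is the Claim_ definition above) =====
theorem statelist2dict_spec : Claim_equal_statelist2dict := by
  intro names statestrings _ hpre
  unfold Spec_statelist2dict
  exact statelist2dict_eq_alt names statestrings hpre.1 hpre.2
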